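-- pv_equiv track=rewrite | github.com/tinkerer-red/CPP-to-GML-Bridger | generator/gml_templates.py | strip_namespace_prefix
-- ===== SOURCE A (Python) =====
-- def strip_namespace_prefix(name, namespace):
--     if not namespace:
--         return name
--     if not name:
--         return name
--
--     lower_name = name.lower()
--     lower_namespace = namespace.lower()
--
--     # Remove direct match prefix (with or without underscores)
--     for variant in [lower_namespace, f"__{lower_namespace}_", f"{lower_namespace}_"]:
--         if lower_name.startswith(variant):
--             stripped = name[len(variant):]
--             return stripped.lstrip("_")  # clean any remaining underscores
--
--     # Also strip if name starts with the namespace directly (case-insensitive)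
--     if lower_name.startswith(lower_namespace):
--         return name[len(namespace):].lstrip("_")
--
--     return name
-- ===== SOURCE B (Python) =====
-- def _match_from(name, namespace, i):
--     # advance a cursor over name while it matches namespace case-insensitively
--     for ch in namespace:
--         if i >= len(name) or name[i].lower() != ch.lower():
--             return None
--         i += 1
--     return i
--
--
-- def strip_namespace_prefix(name, namespace):
--     if not namespace:
--         return name
--     if not name:
--         return name
--     k = _match_from(name, namespace, 0)
--     if k is None and name[:2] == "__":
--         j = _match_from(name, namespace, 2)
--         if j is not None and j < len(name) and name[j] == "_":
--             k = j
--     if k is None: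
--         return name
--     while k < len(name) and name[k] == "_":
--         k += 1
--     return name[k:]
-- ===== Notes on version B (the rewrite author's own statement) =====
-- stated objective: alternative
-- what changed: Instead of lowercasing both strings and testing a list of precomposed prefix-variant strings with startswith then lstrip, B advances a single integer cursor char by char (one case-insensitive matcher reused at offsets 0 and 2, plus a trailing-underscore check and an underscore-skipping loop on the same cursor), building no intermediate strings.
import Mathlib
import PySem

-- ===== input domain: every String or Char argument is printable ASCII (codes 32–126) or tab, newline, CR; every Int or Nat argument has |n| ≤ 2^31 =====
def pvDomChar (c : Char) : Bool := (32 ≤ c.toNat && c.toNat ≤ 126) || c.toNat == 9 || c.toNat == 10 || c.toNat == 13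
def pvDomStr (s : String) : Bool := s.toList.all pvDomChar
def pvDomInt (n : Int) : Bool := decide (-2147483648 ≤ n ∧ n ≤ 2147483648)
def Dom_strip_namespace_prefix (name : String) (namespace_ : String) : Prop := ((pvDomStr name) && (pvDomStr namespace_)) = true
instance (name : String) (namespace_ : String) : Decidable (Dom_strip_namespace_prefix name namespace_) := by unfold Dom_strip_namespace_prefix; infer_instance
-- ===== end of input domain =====

-- B replaces A's build-the-lowered-copies-and-variant-strings-then-startswith approach with a
-- single integer cursor advanced char by char (one matcher reused at offsets 0 and 2, then an
-- underscore-skipping loop on the same cursor); objective: alternative, not claimed faster.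

-- exact port of str.lstrip("_"): drop the leading '_' characters (used by port A)
def pyLstripU (s : List Char) : List Char := s.dropWhile (· == '_')

-- ===== PORT A =====
def strip_namespace_prefix (name : String) (namespace_ : String) : String :=
  if namespace_ = "" then name
  else if name = "" then name
  else
    let lower_name := (PySem.Str.lower name).toList
    let lower_namespace := (PySem.Str.lower namespace_).toList
    -- [lower_namespace, f"__{lower_namespace}_", f"{lower_namespace}_"]
    let variants : List (List Char) :=
      [lower_namespace, ['_', '_'] ++ lower_namespace ++ ['_'], lower_namespace ++ ['_']]
    -- the for loop with early return: first variant that is a prefix wins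
    match variants.find? (fun v => PySem.Chars.startswith lower_name v) with
    | some v =>
        -- name[len(variant):].lstrip("_"); the slice bound is ≥ 0, so it is drop (exact)
        String.ofList (pyLstripU (name.toList.drop v.length))
    | none =>
        if PySem.Chars.startswith lower_name lower_namespace then
          String.ofList (pyLstripU (name.toList.drop namespace_.toList.length))
        else name

-- ===== PORT B =====
-- _match_from: advance the cursor i over n while it matches z case-insensitively;
-- per-character str.lower() is PySem.Chars.lowerChar (exact on the ASCII domain)
def bMatchFrom (n : List Char) (z : List Char) (i : Nat) : Option Nat :=
  match z with
  | [] => some i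
  | c :: zs =>
    match n[i]? with
    | none => none
    | some d =>
      if PySem.Chars.lowerChar d = PySem.Chars.lowerChar c then bMatchFrom n zs (i + 1)
      else none

-- the 'while k < len(name) and name[k] == "_": k += 1' loop
def bSkipU (n : List Char) (k : Nat) : Nat :=
  match h : n[k]? with
  | some c => if c = '_' then bSkipU n (k + 1) else k
  | none => k
termination_by n.length - k
decreasing_by
  have : k < n.length := List.getElem?_eq_some_iff.mp h |>.1
  omega

def strip_namespace_prefix_alt (name : String) (namespace_ : String) : String :=
  if namespace_ = "" then name
  else if name = "" then name
  else
    let n := name.toList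
    let z := namespace_.toList
    let k0 := bMatchFrom n z 0
    let k : Option Nat :=
      match k0 with
      | some k => some k
      | none =>
        -- 'name[:2] == "__"'
        if n.take 2 = ['_', '_'] then
          match bMatchFrom n z 2 with
          | some j => if n[j]? = some '_' then some j else none  -- j < len(name) and name[j] == '_'
          | none => none
        else none
    match k with
    | some k => String.ofList (n.drop (bSkipU n k))  -- name[k:] after the while loop
    | none => name

-- ===== PRECONDITION & SPEC =====
def Spec_strip_namespace_prefix (name : String) (namespace_ : String) (out : String) : Prop := out = strip_namespace_prefix_alt name namespace_
instance (name : String) (namespace_ : String) (out : String) : Decidable (Spec_strip_namespace_prefix name namespace_ out) := by unfold Spec_strip_namespace_prefix; infer_instance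

-- ===== CLAIM (what is proved, stated in full; the proofs are below) =====
def Claim_equal_strip_namespace_prefix : Prop := ∀ (name : String) (namespace_ : String), Dom_strip_namespace_prefix name namespace_ → Spec_strip_namespace_prefix name namespace_ (strip_namespace_prefix name namespace_)

-- ===== LEMMAS AND PROOFS =====

theorem lowerChar_underscore : PySem.Chars.lowerChar '_' = '_' := by decide

theorem lowerChar_eq_underscore (c : Char) (h : PySem.Chars.lowerChar c = '_') : c = '_' := by
  unfold PySem.Chars.lowerChar PySem.Chars.isupper at h
  split at h
  · exfalso
    rename_i hu
    simp only [Bool.and_eq_true, decide_eq_true_eq, Char.le_def, UInt32.le_iff_toNat_le] at hu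
    obtain ⟨h1, h2⟩ := hu
    have e1 : ('A').val.toNat = 65 := rfl
    have e2 : ('Z').val.toNat = 90 := rfl
    have ec : c.val.toNat = c.toNat := rfl
    rw [e1, ec] at h1; rw [e2, ec] at h2
    have hv : Nat.isValidChar (c.toNat + 32) := by
      unfold Nat.isValidChar; left; omega
    have h3 := congrArg Char.toNat h
    rw [Char.toNat_ofNat, if_pos hv] at h3
    have e3 : ('_').toNat = 95 := rfl
    rw [e3] at h3
    omega
  · exact h

theorem lower_eq_map (s : String) :
    (PySem.Str.lower s).toList = s.toList.map PySem.Chars.lowerChar := by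
  rw [PySem.Str.toList_lower]
  rfl

-- the cursor matcher is a prefix test on the lowered suffix, returning i + |z| on success
theorem bMatchFrom_eq (n : List Char) (z : List Char) : ∀ i,
    bMatchFrom n z i =
      if (z.map PySem.Chars.lowerChar).isPrefixOf ((n.drop i).map PySem.Chars.lowerChar)
      then some (i + z.length) else none := by
  induction z with
  | nil => intro i; simp [bMatchFrom]
  | cons c zs ih =>
    intro i
    cases hni : n[i]? with
    | none =>
      have hlen : n.length ≤ i := List.getElem?_eq_none_iff.mp hni
      simp [bMatchFrom, hni, List.drop_eq_nil_of_le hlen]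
    | some d =>
      obtain ⟨hi, hd⟩ := List.getElem?_eq_some_iff.mp hni
      have hdrop : n.drop i = d :: n.drop (i + 1) := by
        rw [List.drop_eq_getElem_cons hi, hd]
      simp only [bMatchFrom, hni, hdrop, List.map_cons, List.isPrefixOf_cons₂]
      by_cases hb : PySem.Chars.lowerChar d = PySem.Chars.lowerChar c
      · rw [if_pos hb, ih (i + 1)]
        have : i + 1 + zs.length = i + (zs.length + 1) := by omega
        simp [hb, this]
      · rw [if_neg hb, if_neg]
        simp only [Bool.and_eq_true, beq_iff_eq]
        intro hc
        exact hb hc.1.symm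
  
-- the underscore-skipping cursor computes dropWhile on the suffix
theorem bSkipU_drop (n : List Char) : ∀ k,
    n.drop (bSkipU n k) = (n.drop k).dropWhile (· == '_') := by
  intro k
  fun_induction bSkipU n k with
  | case1 k h ih =>
    obtain ⟨hk, hc⟩ := List.getElem?_eq_some_iff.mp h
    rw [List.drop_eq_getElem_cons hk, hc, List.dropWhile_cons_of_pos (by simp)]
    exact ih
  | case2 k c h hne =>
    obtain ⟨hk, hc⟩ := List.getElem?_eq_some_iff.mp h
    rw [List.drop_eq_getElem_cons hk, hc, List.dropWhile_cons_of_neg (by simpa using hne)]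
  | case3 k h =>
    have hlen : n.length ≤ k := List.getElem?_eq_none_iff.mp h
    simp [List.drop_eq_nil_of_le hlen]

-- getElem two places past a double cons (used to read through the "__" wrapper)
theorem getElem_cons_cons (a b : Char) (l : List Char) (m : Nat) (h : m < l.length) :
    (a :: b :: l)[2 + m]'(by simp; omega) = l[m] := by
  have e : 2 + m = m + 1 + 1 := by omega
  simp [e]

theorem strip_equiv (name namespace_ : String) :
    strip_namespace_prefix name namespace_ = strip_namespace_prefix_alt name namespace_ := by
  unfold strip_namespace_prefix strip_namespace_prefix_alt
  by_cases hz : namespace_ = ""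
  · simp [hz]
  by_cases hn : name = ""
  · simp [hz, hn]
  simp only [hz, hn, if_false]
  rw [lower_eq_map, lower_eq_map]
  set n := name.toList with hndef
  set z := namespace_.toList with hzdef
  set ln := n.map PySem.Chars.lowerChar with hln
  set lz := z.map PySem.Chars.lowerChar with hlz
  have hlzlen : lz.length = z.length := by simp [hlz]
  have hlnlen : ln.length = n.length := by simp [hln]
  have hlnget : ∀ i, ∀ hi : i < n.length,
      ln[i]'(by omega) = PySem.Chars.lowerChar n[i] := by
    intro i hi; simp [hln]
  rw [bMatchFrom_eq, bMatchFrom_eq]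
  simp only [List.drop_zero]
  simp only [← hln, ← hlz]
  by_cases hb0 : lz.isPrefixOf ln
  · -- bare namespace matches at 0: A picks the first variant, B's first cursor run succeeds
    rw [List.find?_cons_of_pos (by simpa [PySem.Chars.startswith_iff, ← List.isPrefixOf_iff_prefix] using hb0)]
    rw [if_pos hb0]
    show String.ofList (pyLstripU (n.drop lz.length)) = String.ofList (n.drop (bSkipU n (0 + z.length)))
    rw [bSkipU_drop]
    simp [pyLstripU, hlzlen]
  · rw [List.find?_cons_of_neg (by simpa [PySem.Chars.startswith_iff, ← List.isPrefixOf_iff_prefix] using hb0)]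
    rw [if_neg hb0]
    have hmap_drop : (n.drop 2).map PySem.Chars.lowerChar = ln.drop 2 := by
      simp [hln, List.map_drop]
    by_cases hw : ('_' :: '_' :: (lz ++ ['_'])).isPrefixOf ln
    · -- the "__ns_" wrapper matches
      obtain ⟨rest, hrest⟩ := List.isPrefixOf_iff_prefix.mp hw
      have hrest' : ln = '_' :: '_' :: (lz ++ '_' :: rest) := by simpa using hrest.symm
      have hlen : z.length + 3 ≤ n.length := by
        have := congrArg List.length hrest'
        simp [hlzlen] at this
        omega
      have hund : ∀ i, ∀ hi : i < n.length, i < 2 → n[i] = '_' := by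
        intro i hi hlt
        apply lowerChar_eq_underscore
        rw [← hlnget i hi]
        rw [List.getElem_of_eq hrest' (by omega)]
        match i, hlt with
        | 0, _ => rfl
        | 1, _ => rfl
      have htake : n.take 2 = ['_', '_'] := by
        apply List.ext_getElem
        · simp; omega
        · intro i h1 h2
          simp only [List.length_cons, List.length_nil] at h2
          have hi : i < n.length := by simp at h1; omega
          rw [List.getElem_take, hund i hi (by omega)]
          match i, h2 with
          | 0, _ => rfl
          | 1, _ => rfl
      rw [List.find?_cons_of_pos
        (by simp only [PySem.Chars.startswith_iff, ← List.isPrefixOf_iff_prefix]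
            simpa using hw)]
      rw [if_pos htake, hmap_drop]
      have hdrop2 : ln.drop 2 = lz ++ '_' :: rest := by rw [hrest']; rfl
      have hpre2 : lz.isPrefixOf (ln.drop 2) := by
        rw [hdrop2]; exact List.isPrefixOf_iff_prefix.mpr ⟨'_' :: rest, by simp⟩
      rw [if_pos hpre2]
      have hju : n[2 + z.length]'(by omega) = '_' := by
        apply lowerChar_eq_underscore
        rw [← hlnget _ (by omega)]
        rw [List.getElem_of_eq hrest' (by rw [hlnlen]; omega)]
        rw [getElem_cons_cons _ _ _ _ (by simp [hlzlen])]
        rw [List.getElem_append_right (by omega)]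
        have e0 : z.length - lz.length = 0 := by omega
        simp [e0]
      have hjq : n[2 + z.length]? = some '_' := by
        rw [List.getElem?_eq_getElem (by omega), hju]
      show String.ofList (pyLstripU (n.drop (['_', '_'] ++ lz ++ ['_']).length))
          = match (if n[2 + z.length]? = some '_' then some (2 + z.length) else none : Option Nat) with
            | some k => String.ofList (n.drop (bSkipU n k))
            | none => name
      rw [if_pos hjq]
      show String.ofList (pyLstripU (n.drop (['_', '_'] ++ lz ++ ['_']).length))
          = String.ofList (n.drop (bSkipU n (2 + z.length)))
      have hL : (['_', '_'] ++ lz ++ ['_']).length = z.length + 3 := by simp [hlzlen]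
      rw [hL, bSkipU_drop]
      have hstep : n.drop (2 + z.length) = '_' :: n.drop (z.length + 3) := by
        rw [List.drop_eq_getElem_cons (by omega : 2 + z.length < n.length), hju]
        have e : 2 + z.length + 1 = z.length + 3 := by omega
        rw [e]
      rw [hstep, List.dropWhile_cons_of_pos (by simp)]
      rfl
    · -- no variant matches: both return name unchanged
      rw [List.find?_cons_of_neg
        (by simp only [PySem.Chars.startswith_iff, ← List.isPrefixOf_iff_prefix]
            simpa using hw)]
      have hb3 : ¬ PySem.Chars.startswith ln (lz ++ ['_']) = true := by
        simp only [PySem.Chars.startswith_iff]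
        intro hc
        exact hb0 (List.isPrefixOf_iff_prefix.mpr ((lz.prefix_append ['_']).trans hc))
      rw [List.find?_cons_of_neg hb3]
      simp only [List.find?_nil]
      rw [if_neg (by simpa [PySem.Chars.startswith_iff, ← List.isPrefixOf_iff_prefix] using hb0)]
      by_cases htake : n.take 2 = ['_', '_']
      · rw [if_pos htake, hmap_drop]
        by_cases hpre2 : lz.isPrefixOf (ln.drop 2)
        · rw [if_pos hpre2]
          show name = match (if n[2 + z.length]? = some '_' then some (2 + z.length) else none : Option Nat) with
              | some k => String.ofList (n.drop (bSkipU n k))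
              | none => name
          by_cases hjq : n[2 + z.length]? = some '_'
          · -- if the trailing-underscore check also passed, the wrapper would have matched
            exfalso
            apply hw
            have hn2 : 2 ≤ n.length := by
              have := congrArg List.length htake; simp at this; omega
            have h0 : n[0]'(by omega) = '_' := by
              have := List.getElem_of_eq htake.symm (by simp : (0 : ℕ) < (['_', '_'] : List Char).length)
              rw [List.getElem_take] at this
              exact this.symm
            have h1 : n[1]'(by omega) = '_' := by
              have := List.getElem_of_eq htake.symm (by simp : (1 : ℕ) < (['_', '_'] : List Char).length)
              rw [List.getElem_take] at this
              exact this.symm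
            obtain ⟨t, ht⟩ := List.isPrefixOf_iff_prefix.mp hpre2
            obtain ⟨hjlt, hjc⟩ := List.getElem?_eq_some_iff.mp hjq
            -- t is nonempty and starts with '_'
            have htlen : z.length + t.length = ln.length - 2 := by
              have := congrArg List.length ht; simp [hlzlen] at this; omega
            have htne : 0 < t.length := by rw [hlnlen] at htlen; omega
            have ht0 : t[0]'htne = '_' := by
              apply lowerChar_eq_underscore
              have e1 : (ln.drop 2)[z.length]'(by simp; rw [hlnlen]; omega) = t[0]'htne := by
                rw [List.getElem_of_eq ht.symm, List.getElem_append_right (by omega)]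
                simp [hlzlen]
              have e2 : (ln.drop 2)[z.length]'(by simp; rw [hlnlen]; omega)
                  = PySem.Chars.lowerChar (n[2 + z.length]'hjlt) := by
                rw [List.getElem_drop, ← hlnget _ (by omega)]
              rw [← e1, e2, hjc]
              exact lowerChar_underscore
            have hln01 : ln = '_' :: '_' :: (lz ++ t) := by
              rw [ht]
              apply List.ext_getElem
              · simp
                omega
              · intro i hA hB
                match i with
                | 0 => simp [hlnget 0 (by omega), h0, lowerChar_underscore]
                | 1 => simp [hlnget 1 (by omega), h1, lowerChar_underscore]
                | (j + 2) =>
                  simp only [List.getElem_cons_succ, List.getElem_drop]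
                  have e2j : j + 2 = 2 + j := by omega
                  simp [e2j]
            apply List.isPrefixOf_iff_prefix.mpr
            refine ⟨t.drop 1, ?_⟩
            rw [hln01]
            have htcons : t = '_' :: t.drop 1 := by
              cases t with
              | nil => simp at htne
              | cons a t' => simpa using ht0
            conv_rhs => rw [htcons]
            simp
          · rw [if_neg hjq]
        · rw [if_neg hpre2]
      · rw [if_neg htake]

-- ===== VERDICT (by name: the statement is the Claim_ definition above) =====
theorem strip_namespace_prefix_spec : Claim_equal_strip_namespace_prefix := by
  intro name namespace_ _
  unfold Spec_strip_namespace_prefix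
  exact strip_equiv name namespace_
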